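-- pv_equiv track=rewrite | github.com/AbstractUmbra/Shared-Bot-Utilities | paginator.py | _split_remaining_words
-- ===== SOURCE A (Python) =====
-- def _split_remaining_words(line: str, max_chars: int) -> tuple[str, str | None]:
--     """
--     Internal: split a line into two strings -- reduced_words and remaining_words.
--
--     reduced_words: the remaining words in `line`, after attempting to remove all words that
--         exceed `max_chars` (rounding down to the nearest word boundary).
--
--     remaining_words: the words in `line` which exceed `max_chars`. This value is None if
--         no words could be split from `line`.
--
--     If there are any remaining_words, an ellipses is appended to reduced_words and a
--     continuation header is inserted before remaining_words to visually communicate the line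
--     continuation.
--
--     Return a tuple in the format (reduced_words, remaining_words).
--     """
--     reduced_words = []
--     remaining_words = []
--
--     # "(Continued)" is used on a line by itself to indicate the continuation of last page
--     continuation_header = "(Continued)\n-----------\n"
--     reduced_char_count = 0
--     is_full = False
--
--     for word in line.split(" "):
--         if not is_full:
--             if len(word) + reduced_char_count <= max_chars:
--                 reduced_words.append(word)
--                 reduced_char_count += len(word) + 1
--             else:
--                 # If reduced_words is empty, we were unable to split the words across pages
--                 if not reduced_words:
--                     return line, None
--                 is_full = True
--                 remaining_words.append(word)
--         else:
--             remaining_words.append(word)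
--
--     return (
--         " ".join(reduced_words) + "..." if remaining_words else "",
--         continuation_header + " ".join(remaining_words) if remaining_words else None,
--     )
-- ===== SOURCE B (Python) =====
-- def _split_remaining_words(line: str, max_chars: int) -> tuple[str, str | None]:
--     words = line.split(" ")
--     # cumulative space-accounted lengths: prefix[i] = sum(len(w)+1 for w in words[:i+1]),
--     # strictly increasing, so "word i fits" (len+count <= max_chars) iff prefix[i] <= max_chars+1,
--     # and the split point is found by binary search instead of a greedy scan.
--     prefix = []
--     total = 0
--     for w in words:
--         total += len(w) + 1
--         prefix.append(total)
--     lo, hi = 0, len(words)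
--     while lo < hi:
--         mid = (lo + hi) // 2
--         if prefix[mid] <= max_chars + 1:
--             lo = mid + 1
--         else:
--             hi = mid
--     if lo == len(words):
--         return "", None
--     if lo == 0:
--         return line, None
--     return (
--         " ".join(words[:lo]) + "...",
--         "(Continued)\n-----------\n" + " ".join(words[lo:]),
--     )
-- ===== Notes on version B (the rewrite author's own statement) =====
-- stated objective: alternative
-- what changed: B builds the list of cumulative space-accounted word lengths (strictly increasing) and binary-searches it for the split point, instead of A's greedy flagged scan that appends each word to one of two lists.
import Mathlib
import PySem

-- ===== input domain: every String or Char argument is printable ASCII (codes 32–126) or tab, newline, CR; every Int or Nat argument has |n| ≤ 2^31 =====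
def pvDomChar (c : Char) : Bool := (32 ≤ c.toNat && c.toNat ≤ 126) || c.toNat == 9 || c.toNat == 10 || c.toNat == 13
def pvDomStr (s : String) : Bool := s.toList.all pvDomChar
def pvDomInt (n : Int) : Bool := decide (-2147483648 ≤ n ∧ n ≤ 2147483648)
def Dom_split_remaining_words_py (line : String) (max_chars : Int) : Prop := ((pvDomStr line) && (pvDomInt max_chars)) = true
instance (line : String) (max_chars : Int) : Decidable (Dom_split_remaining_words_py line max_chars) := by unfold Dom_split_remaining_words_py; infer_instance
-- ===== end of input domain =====

-- B finds the split point by binary search on the strictly increasing cumulative word lengths;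
-- A greedily appends each word to one of two lists under an is_full flag. Same result, no speed claim.

-- shared constants of the Python source
def pvHeader : List Char := "(Continued)\n-----------\n".toList
def pvDots : List Char := "...".toList
def pvJoinSp (ws : List (List Char)) : List Char := PySem.Chars.join [' '] ws

-- ===== PORT A =====
-- the for-loop of A: state (reduced_words, remaining_words, reduced_char_count, is_full);
-- the early 'return line, None' is the (line, none) branch
def pvLoopA (line : String) (max_chars : Int) :
    List (List Char) → List (List Char) → List (List Char) → Int → Bool → String × Option String
  | [], red, rem, _, _ =>
      (if rem ≠ [] then String.ofList (pvJoinSp red ++ pvDots) else "",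
       if rem ≠ [] then some (String.ofList (pvHeader ++ pvJoinSp rem)) else none)
  | w :: ws, red, rem, cnt, full =>
      if full then pvLoopA line max_chars ws red (rem ++ [w]) cnt full
      else if (w.length : Int) + cnt ≤ max_chars then
        pvLoopA line max_chars ws (red ++ [w]) rem (cnt + w.length + 1) false
      else if red = [] then (line, none)
      else pvLoopA line max_chars ws red (rem ++ [w]) cnt true

def split_remaining_words_py (line : String) (max_chars : Int) : String × Option String :=
  pvLoopA line max_chars (PySem.Chars.splitOn line.toList [' ']) [] [] 0 false

-- ===== PORT B =====
-- B's first loop: cumulative space-accounted lengths prefix[i] = total after word i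
def pvPrefix : List (List Char) → Int → List Int
  | [], _ => []
  | w :: ws, total => (total + w.length + 1) :: pvPrefix ws (total + w.length + 1)

-- B's while-loop: binary search for the number of leading prefix entries ≤ t
-- (prefix[mid] is always in range in B; getD 0 is exact here)
def pvBSearch (p : List Int) (t : Int) (lo hi : Nat) : Nat :=
  if h : lo < hi then
    if p.getD ((lo + hi) / 2) 0 ≤ t then pvBSearch p t ((lo + hi) / 2 + 1) hi
    else pvBSearch p t lo ((lo + hi) / 2)
  else lo
termination_by hi - lo
decreasing_by all_goals omega

def split_remaining_words_py_alt (line : String) (max_chars : Int) : String × Option String :=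
  let words := PySem.Chars.splitOn line.toList [' ']
  let lo := pvBSearch (pvPrefix words 0) (max_chars + 1) 0 words.length
  if lo = words.length then ("", none)
  else if lo = 0 then (line, none)
  else (String.ofList (pvJoinSp (words.take lo) ++ pvDots),
        some (String.ofList (pvHeader ++ pvJoinSp (words.drop lo))))

-- ===== PRECONDITION & SPEC =====
def Spec_split_remaining_words_py (line : String) (max_chars : Int) (out : String × Option String) : Prop := out = split_remaining_words_py_alt line max_chars
instance (line : String) (max_chars : Int) (out : String × Option String) : Decidable (Spec_split_remaining_words_py line max_chars out) := by unfold Spec_split_remaining_words_py; infer_instance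

-- ===== CLAIM (what is proved, stated in full; the proofs are below) =====
def Claim_equal_split_remaining_words_py : Prop := ∀ (line : String) (max_chars : Int), Dom_split_remaining_words_py line max_chars → Spec_split_remaining_words_py line max_chars (split_remaining_words_py line max_chars)

-- ===== LEMMAS AND PROOFS =====

-- A-side: index of the first word that overflows (none if every word fits)
def pvSplitIdx (max_chars : Int) : List (List Char) → Int → Option Nat
  | [], _ => none
  | w :: ws, cnt =>
      if (w.length : Int) + cnt > max_chars then some 0
      else (pvSplitIdx max_chars ws (cnt + w.length + 1)).map (· + 1)

-- once is_full is set, A only appends the rest to remaining_words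
theorem pvLoopA_full (line : String) (max_chars : Int) :
    ∀ (ws red rem : List (List Char)) (cnt : Int), rem ≠ [] →
      pvLoopA line max_chars ws red rem cnt true
        = (String.ofList (pvJoinSp red ++ pvDots), some (String.ofList (pvHeader ++ pvJoinSp (rem ++ ws)))) := by
  intro ws
  induction ws with
  | nil => intro red rem cnt h; simp [pvLoopA, h]
  | cons w ws ih =>
      intro red rem cnt h
      rw [pvLoopA, if_pos rfl, ih _ _ _ (by simp)]
      simp

-- A's loop in the not-yet-full state, reduced_words nonempty, equals the slice form
-- driven by the first-overflow index
theorem pvLoopA_main (line : String) (max_chars : Int) :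
    ∀ (ws : List (List Char)) (cnt : Int) (red : List (List Char)), red ≠ [] →
      pvLoopA line max_chars ws red [] cnt false
        = (match pvSplitIdx max_chars ws cnt with
           | none => ("", none)
           | some k => (String.ofList (pvJoinSp (red ++ ws.take k) ++ pvDots),
                        some (String.ofList (pvHeader ++ pvJoinSp (ws.drop k))))) := by
  intro ws
  induction ws with
  | nil => intro cnt red _; simp [pvLoopA, pvSplitIdx]
  | cons w ws ih =>
      intro cnt red hred
      by_cases hfit : (w.length : Int) + cnt ≤ max_chars
      · rw [pvLoopA, if_neg (by simp), if_pos hfit,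
            ih (cnt + w.length + 1) (red ++ [w]) (by simp)]
        rw [pvSplitIdx, if_neg (by omega)]
        cases pvSplitIdx max_chars ws (cnt + ↑w.length + 1) with
        | none => rfl
        | some k => simp
      · rw [pvLoopA, if_neg (by simp), if_neg hfit, if_neg hred]
        simp only [List.nil_append]
        rw [pvLoopA_full line max_chars ws red [w] cnt (by simp),
            pvSplitIdx, if_pos (by omega)]
        simp

-- A rewritten through the first-overflow index
theorem pvA_idxForm (line : String) (max_chars : Int) :
    split_remaining_words_py line max_chars
      = (match pvSplitIdx max_chars (PySem.Chars.splitOn line.toList [' ']) 0 with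
         | none => ("", none)
         | some 0 => (line, none)
         | some k => (String.ofList (pvJoinSp ((PySem.Chars.splitOn line.toList [' ']).take k) ++ pvDots),
                      some (String.ofList (pvHeader ++ pvJoinSp ((PySem.Chars.splitOn line.toList [' ']).drop k))))) := by
  unfold split_remaining_words_py
  cases hws : PySem.Chars.splitOn line.toList [' '] with
  | nil => simp [pvLoopA, pvSplitIdx]
  | cons w ws =>
      by_cases hfit : (w.length : Int) + 0 ≤ max_chars
      · rw [pvLoopA, if_neg (by simp), if_pos hfit]
        simp only [List.nil_append]
        rw [pvLoopA_main line max_chars ws (0 + w.length + 1) [w] (by simp),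
            pvSplitIdx, if_neg (by omega)]
        cases pvSplitIdx max_chars ws (0 + (w.length : Int) + 1) with
        | none => rfl
        | some k => simp
      · rw [pvLoopA, if_neg (by simp), if_neg hfit, if_pos rfl,
            pvSplitIdx, if_pos (by omega)]

theorem pvPrefix_length (ws : List (List Char)) : ∀ c, (pvPrefix ws c).length = ws.length := by
  induction ws with
  | nil => intro c; rfl
  | cons w ws ih => intro c; simp [pvPrefix, ih]

theorem pvPrefix_gt (ws : List (List Char)) : ∀ c x, x ∈ pvPrefix ws c → c < x := by
  induction ws with
  | nil => intro c x h; simp [pvPrefix] at h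
  | cons w ws ih =>
      intro c x h
      simp only [pvPrefix, List.mem_cons] at h
      rcases h with h | h
      · subst h; have : (0:Int) ≤ (w.length : Int) := by positivity
        omega
      · have := ih (c + w.length + 1) x h
        have : (0:Int) ≤ (w.length : Int) := by positivity
        omega

theorem pvSplitIdx_lt_len (max_chars : Int) (ws : List (List Char)) :
    ∀ cnt k, pvSplitIdx max_chars ws cnt = some k → k < ws.length := by
  induction ws with
  | nil => intro cnt k h; simp [pvSplitIdx] at h
  | cons w ws ih =>
      intro cnt k h
      rw [pvSplitIdx] at h
      split_ifs at h with hc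
      · simp at h; simp only [List.length_cons]; omega
      · cases hrec : pvSplitIdx max_chars ws (cnt + w.length + 1) with
        | none => rw [hrec] at h; simp at h
        | some j =>
            rw [hrec] at h; simp at h
            have := ih _ _ hrec
            simp only [List.length_cons]; omega

-- the number pvG of fitting leading words, and its characterisation via the prefix list
def pvG (max_chars : Int) (ws : List (List Char)) (cnt : Int) : Nat :=
  (pvSplitIdx max_chars ws cnt).getD ws.length

theorem pvG_char (max_chars : Int) (ws : List (List Char)) :
    ∀ cnt i, i < ws.length →
      (i < pvG max_chars ws cnt ↔ (pvPrefix ws cnt).getD i 0 ≤ max_chars + 1) := by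
  induction ws with
  | nil => intro cnt i h; simp at h
  | cons w ws ih =>
      intro cnt i hi
      unfold pvG
      rw [pvSplitIdx]
      by_cases hc : (w.length : Int) + cnt > max_chars
      · rw [if_pos hc]
        simp only [Option.getD_some]
        cases i with
        | zero =>
            simp only [pvPrefix, List.getD_cons_zero]
            constructor
            · intro h0; exact absurd h0 (by omega)
            · intro hle; omega
        | succ j =>
            simp only [pvPrefix, List.getD_cons_succ]
            constructor
            · intro h0; exact absurd h0 (by omega)
            · intro hle
              exfalso
              have hj : j < (pvPrefix ws (cnt + w.length + 1)).length := by
                rw [pvPrefix_length]; simpa using hi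
              rw [List.getD_eq_getElem _ _ hj] at hle
              have hmem := List.getElem_mem hj
              have := pvPrefix_gt ws (cnt + w.length + 1) _ hmem
              omega
      · rw [if_neg hc]
        cases i with
        | zero =>
            simp only [pvPrefix, List.getD_cons_zero]
            constructor
            · intro _; omega
            · intro _
              cases pvSplitIdx max_chars ws (cnt + w.length + 1) <;> simp
        | succ j =>
            have hj : j < ws.length := by simpa using hi
            have := ih (cnt + w.length + 1) j hj
            unfold pvG at this
            simp only [pvPrefix, List.getD_cons_succ]
            rw [← this]
            cases pvSplitIdx max_chars ws (cnt + w.length + 1) <;> simp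

-- binary search correctness against a characterised target F
theorem pvBSearch_spec (p : List Int) (t : Int) (F : Nat)
    (hF : ∀ i, i < p.length → (i < F ↔ p.getD i 0 ≤ t)) :
    ∀ n lo hi, hi - lo ≤ n → lo ≤ F → F ≤ hi → hi ≤ p.length → pvBSearch p t lo hi = F := by
  intro n
  induction n with
  | zero =>
      intro lo hi hle hlo hhi hlen
      rw [pvBSearch, dif_neg (by omega)]
      omega
  | succ n ih =>
      intro lo hi hle hlo hhi hlen
      by_cases h : lo < hi
      · rw [pvBSearch, dif_pos h]
        by_cases hm : p.getD ((lo + hi) / 2) 0 ≤ t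
        · rw [if_pos hm]
          have hmid : (lo + hi) / 2 < p.length := by omega
          have : (lo + hi) / 2 < F := (hF _ hmid).mpr hm
          exact ih ((lo + hi) / 2 + 1) hi (by omega) (by omega) hhi hlen
        · rw [if_neg hm]
          have hmid : (lo + hi) / 2 < p.length := by omega
          have : ¬ ((lo + hi) / 2 < F) := fun hlt => hm ((hF _ hmid).mp hlt)
          exact ih lo ((lo + hi) / 2) (by omega) hlo (by omega) (by omega)
      · rw [pvBSearch, dif_neg h]; omega

theorem pvBSearch_eq_G (max_chars : Int) (ws : List (List Char)) :
    pvBSearch (pvPrefix ws 0) (max_chars + 1) 0 ws.length = pvG max_chars ws 0 := by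
  have hlen := pvPrefix_length ws 0
  have hFlen : pvG max_chars ws 0 ≤ ws.length := by
    unfold pvG
    cases h : pvSplitIdx max_chars ws 0 with
    | none => simp
    | some k => have := pvSplitIdx_lt_len max_chars ws 0 k h; simp; omega
  exact pvBSearch_spec (pvPrefix ws 0) (max_chars + 1) (pvG max_chars ws 0)
    (fun i hi => pvG_char max_chars ws 0 i (by omega))
    ws.length 0 ws.length (by omega) (by omega) hFlen (by omega)

-- ===== VERDICT (by name: the statement is the Claim_ definition above) =====
theorem split_remaining_words_py_spec : Claim_equal_split_remaining_words_py := by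
  intro line max_chars _
  unfold Spec_split_remaining_words_py split_remaining_words_py_alt
  rw [pvA_idxForm]
  simp only
  rw [pvBSearch_eq_G]
  unfold pvG
  cases h : pvSplitIdx max_chars (PySem.Chars.splitOn line.toList [' ']) 0 with
  | none => simp
  | some k =>
      have hk := pvSplitIdx_lt_len max_chars _ 0 k h
      cases k with
      | zero => simp [Nat.ne_of_lt hk]
      | succ j =>
          simp only [Option.getD_some]
          rw [if_neg (by omega), if_neg (by omega)]
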